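-- pv_equiv track=rewrite | github.com/antao/project-euler | python/002/problem-002.py | solution
-- ===== SOURCE A (Python) =====
-- def solution(max):
--     x, y = 1, 1
--     result = 0
--     while x <= max:
--         if x % 2 == 0:
--             result += x
--         x, y = y, x + y
--     return str(result)
-- ===== SOURCE B (Python) =====
-- def solution(max):
--     # Closed-form identity: the sum of the even Fibonacci numbers up to F(3k)
--     # equals (F(3k+2) - 1) // 2, so we step three Fibonacci indices at a time
--     # (even term a = F(3k), successor b = F(3k+1)) and recompute the answer
--     # from the current pair instead of keeping a running sum.
--     def go(a, b, result):
--         if a > max: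
--             return result
--         return go(a + 2 * b, 2 * a + 3 * b, (a + b - 1) // 2)
--     return str(go(2, 3, 0))
-- ===== Notes on version B (the rewrite author's own statement) =====
-- stated objective: alternative
-- what changed: B drops the running even-sum and the parity test: it steps three Fibonacci indices at a time over the even-term pairs (F(3k), F(3k+1)) in a tail recursion and recomputes the whole answer from the current pair with the closed-form identity sum = (F(3k+2)-1)//2.
import Mathlib
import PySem

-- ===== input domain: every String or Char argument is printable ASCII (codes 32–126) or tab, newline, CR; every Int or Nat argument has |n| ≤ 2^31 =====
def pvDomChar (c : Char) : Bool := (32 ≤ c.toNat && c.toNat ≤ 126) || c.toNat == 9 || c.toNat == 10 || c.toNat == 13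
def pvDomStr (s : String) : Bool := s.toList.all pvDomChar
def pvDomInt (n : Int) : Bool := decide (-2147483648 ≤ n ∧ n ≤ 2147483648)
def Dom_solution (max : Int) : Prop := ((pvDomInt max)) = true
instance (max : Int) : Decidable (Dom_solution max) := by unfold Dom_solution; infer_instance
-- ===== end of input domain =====

-- B replaces A's term-by-term even-sum with the closed-form identity
-- sum of even Fibonacci ≤ F(3k) = (F(3k+2) - 1) // 2, stepping three indices at a time.

-- ===== PORT A =====
-- A's while loop as fuel recursion; 300 iterations cover every max with |max| ≤ 2^31
-- (Fibonacci exceeds 2^31 after fewer than 50 steps), so the fuel guard is never hit on Dom.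
def solutionLoopA (max x y result : Int) : Nat → Int
  | 0 => result
  | fuel + 1 =>
    if x ≤ max then
      solutionLoopA max y (x + y) (if PySem.Int.mod x 2 == 0 then result + x else result) fuel
    else result

def solution (max : Int) : String :=
  PySem.Int.toStr (solutionLoopA max 1 1 0 300)

-- ===== PORT B =====
-- Source B's inner tail recursion `go`, with the same fuel remark (100 even-step iterations).
def solutionGo (max : Int) : Nat → Int → Int → Int → Int
  | 0, _, _, result => result
  | fuel + 1, a, b, result =>
    if max < a then result
    else solutionGo max fuel (a + 2 * b) (2 * a + 3 * b) (PySem.Int.floordiv (a + b - 1) 2)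

def solution_alt (max : Int) : String :=
  PySem.Int.toStr (solutionGo max 100 2 3 0)

-- ===== PRECONDITION & SPEC =====
def Spec_solution (max : Int) (out : String) : Prop := out = solution_alt max
instance (max : Int) (out : String) : Decidable (Spec_solution max out) := by unfold Spec_solution; infer_instance

-- ===== CLAIM (what is proved, stated in full; the proofs are below) =====
def Claim_equal_solution : Prop := ∀ (max : Int), Dom_solution max → Spec_solution max (solution max)

-- ===== LEMMAS AND PROOFS =====

-- Three steps of A's loop from an odd pair (a, b) (= (F(3k-2), F(3k-1))) with the
-- invariant 2·r = b − 1 perform exactly one step of B's recursion on the even pair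
-- (a + b, a + 2b) = (F(3k), F(3k+1)); the invariant makes B's closed-form division
-- coincide with A's accumulated sum.
theorem loopA_eq_go (f : Nat) :
    ∀ (max a b r : Int), 1 ≤ a → a ≤ b → a % 2 = 1 → b % 2 = 1 → 2 * r = b - 1 →
      solutionLoopA max a b r (3 * f) = solutionGo max f (a + b) (a + 2 * b) r := by
  induction f with
  | zero => intro max a b r _ _ _ _ _; rfl
  | succ f ih =>
    intro max a b r ha hab hao hbo hinv
    have h3 : 3 * (f + 1) = (3 * f) + 1 + 1 + 1 := by ring
    rw [h3]
    have ca : ¬ (2 ∣ a) := by omega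
    have cb : ¬ (2 ∣ b) := by omega
    have cab : (2 : Int) ∣ (a + b) := by omega
    by_cases hg : a + b ≤ max
    · have h1 : a ≤ max := by omega
      have h2 : b ≤ max := by omega
      rw [show solutionLoopA max a b r (3 * f + 1 + 1 + 1)
            = solutionLoopA max b (a + b) r (3 * f + 1 + 1) by
          simp [solutionLoopA, h1, ca]]
      rw [show solutionLoopA max b (a + b) r (3 * f + 1 + 1)
            = solutionLoopA max (a + b) (b + (a + b)) r (3 * f + 1) by
          simp [solutionLoopA, h2, cb]]
      rw [show solutionLoopA max (a + b) (b + (a + b)) r (3 * f + 1)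
            = solutionLoopA max (a + 2 * b) (2 * a + 3 * b) (r + (a + b)) (3 * f) by
          simp [solutionLoopA, hg, cab]; congr 1 <;> ring]
      rw [ih max (a + 2 * b) (2 * a + 3 * b) (r + (a + b))
          (by omega) (by omega) (by omega) (by omega) (by omega)]
      have hng : ¬ max < a + b := by omega
      have hdiv : PySem.Int.floordiv ((a + b) + (a + 2 * b) - 1) 2 = r + (a + b) := by
        have : (a + b) + (a + 2 * b) - 1 = 2 * (r + (a + b)) := by omega
        rw [this, PySem.Int.floordiv_eq_ediv_of_pos (by norm_num)]
        omega
      rw [show solutionGo max (f + 1) (a + b) (a + 2 * b) r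
            = solutionGo max f ((a + b) + 2 * (a + 2 * b)) (2 * (a + b) + 3 * (a + 2 * b))
                (PySem.Int.floordiv ((a + b) + (a + 2 * b) - 1) 2) by
          simp [solutionGo, hng]]
      rw [hdiv]
      congr 1 <;> ring
    · have hng : max < a + b := by omega
      rw [show solutionGo max (f + 1) (a + b) (a + 2 * b) r = r by
            simp [solutionGo, hng]]
      by_cases h1 : a ≤ max
      · rw [show solutionLoopA max a b r (3 * f + 1 + 1 + 1)
              = solutionLoopA max b (a + b) r (3 * f + 1 + 1) by
            simp [solutionLoopA, h1, ca]]
        by_cases h2 : b ≤ max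
        · rw [show solutionLoopA max b (a + b) r (3 * f + 1 + 1)
                = solutionLoopA max (a + b) (b + (a + b)) r (3 * f + 1) by
              simp [solutionLoopA, h2, cb]]
          have h3' : ¬ a + b ≤ max := by omega
          simp [solutionLoopA, h3']
        · simp [solutionLoopA, h2]
      · simp [solutionLoopA, h1]

-- ===== VERDICT (by name: the statement is the Claim_ definition above) =====
theorem solution_spec : Claim_equal_solution := by
  intro max _
  unfold Spec_solution solution solution_alt
  have h := loopA_eq_go 100 max 1 1 0 (by norm_num) (by norm_num) (by norm_num) (by norm_num) (by norm_num)
  norm_num at h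
  rw [h]
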